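-- pv_equiv track=rewrite | github.com/saeranv/Fermi | src/parse_text.py | user_fx
-- ===== SOURCE A (Python) =====
-- def user_fx(txtlines_):
--     L_ = []
--     header = []
--     count = 0
--     for i in range(len(txtlines_)):
--         txt = txtlines_[i]
--         if txt =="\n":
--             continue
--         elif "#" in txt:
--             header += [txt]
--         else:
--             newtxt = txt
--             if "\n" in txt:
--                 newtxt = newtxt.replace("\n","")
--             if "A:" in txt:
--                 newtxt = newtxt.replace("A:","\nA:")
--             if "Q:" in txt:
--                 newtxt = newtxt.replace("Q:","\n\n#Q{}\nQ:".format(count))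
--                 count += 1
--             L_.append(newtxt)
--
--     return header + L_
-- ===== SOURCE B (Python) =====
-- def user_fx(txtlines_):
--     # stateless formulation: no running counter; each Q-line's number is its
--     # rank = how many earlier body lines also contain 'Q:'
--     body = [t for t in txtlines_ if t != "\n" and "#" not in t]
--
--     def fmt(i, t):
--         s = t.replace("\n", "")
--         if "A:" in t:
--             s = s.replace("A:", "\nA:")
--         if "Q:" in t:
--             qnum = sum(1 for u in body[:i] if "Q:" in u)
--             s = s.replace("Q:", "\n\n#Q{}\nQ:".format(qnum))
--         return s
--
--     header = [t for t in txtlines_ if t != "\n" and "#" in t]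
--     return header + [fmt(i, t) for i, t in enumerate(body)]
-- ===== Notes on version B (the rewrite author's own statement) =====
-- stated objective: alternative
-- what changed: Eliminates A's stateful index loop with a running Q-counter: B transforms each body line independently (a stateless map over enumerate), computing a Q-line's number as its rank, i.e. the count of earlier 'Q:' body lines in body[:i].
import Mathlib
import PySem

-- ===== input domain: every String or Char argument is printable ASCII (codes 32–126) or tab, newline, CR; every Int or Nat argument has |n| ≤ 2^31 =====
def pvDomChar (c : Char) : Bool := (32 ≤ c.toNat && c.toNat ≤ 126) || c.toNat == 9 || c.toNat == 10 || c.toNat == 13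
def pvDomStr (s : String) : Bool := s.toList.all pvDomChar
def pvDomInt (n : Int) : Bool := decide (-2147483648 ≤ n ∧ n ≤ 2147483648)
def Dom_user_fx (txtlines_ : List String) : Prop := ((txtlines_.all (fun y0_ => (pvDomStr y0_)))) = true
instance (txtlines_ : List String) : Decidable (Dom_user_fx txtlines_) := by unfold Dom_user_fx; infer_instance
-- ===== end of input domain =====

-- B replaces A's stateful fold (running Q-counter threaded through an index loop) by a stateless
-- formulation: each Q-line's number is computed as its rank — the count of earlier 'Q:' body lines —
-- so body lines are transformed by an independent map over enumerate; alternative, same value.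

-- ===== PORT A =====
-- the body of A's for-loop over i in range(len(txtlines_)), on state (L_, header, count)
def pvStepA (st : List String × List String × Int) (txt : String) : List String × List String × Int :=
  if txt = "\n" then st
  else if PySem.Str.isIn "#" txt then (st.1, st.2.1 ++ [txt], st.2.2)
  else
    let newtxt := txt
    let newtxt := if PySem.Str.isIn "\n" txt then PySem.Str.replace newtxt "\n" "" else newtxt
    let newtxt := if PySem.Str.isIn "A:" txt then PySem.Str.replace newtxt "A:" "\nA:" else newtxt
    if PySem.Str.isIn "Q:" txt then
      (st.1 ++ [PySem.Str.replace newtxt "Q:" ("\n\n#Q" ++ PySem.Int.toStr st.2.2 ++ "\nQ:")],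
       st.2.1, st.2.2 + 1)
    else
      (st.1 ++ [newtxt], st.2.1, st.2.2)

def user_fx (txtlines_ : List String) : List String :=
  let st := (PySem.List.pyRange 0 (PySem.List.len txtlines_) 1).foldl
      (fun st i => pvStepA st (PySem.List.pyGetD txtlines_ i "")) ([], [], 0)
  st.2.1 ++ st.1

-- ===== PORT B =====
-- B's fmt(i, t): transform one body line; the Q-number is the rank of this line
-- among the 'Q:' body lines, counted over body[:i] (no running counter anywhere)
def pvFmt (body : List String) (i : Int) (t : String) : String :=
  let s := PySem.Str.replace t "\n" ""
  let s := if PySem.Str.isIn "A:" t then PySem.Str.replace s "A:" "\nA:" else s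
  if PySem.Str.isIn "Q:" t then
    PySem.Str.replace s "Q:"
      ("\n\n#Q" ++ PySem.Int.toStr (((PySem.List.slice body none (some i)).countP
          (fun u => PySem.Str.isIn "Q:" u) : Nat) : Int) ++ "\nQ:")
  else s

def user_fx_alt (txtlines_ : List String) : List String :=
  let body := txtlines_.filter (fun t => t != "\n" && !(PySem.Str.isIn "#" t))
  let header := txtlines_.filter (fun t => t != "\n" && PySem.Str.isIn "#" t)
  header ++ (PySem.List.enumerate body).map (fun p => pvFmt body p.1 p.2)

-- ===== PRECONDITION & SPEC =====
def Spec_user_fx (txtlines_ : List String) (out : List String) : Prop := out = user_fx_alt txtlines_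
instance (txtlines_ : List String) (out : List String) : Decidable (Spec_user_fx txtlines_ out) := by unfold Spec_user_fx; infer_instance

-- ===== CLAIM (what is proved, stated in full; the proofs are below) =====
def Claim_equal_user_fx : Prop := ∀ (txtlines_ : List String), Dom_user_fx txtlines_ → Spec_user_fx txtlines_ (user_fx txtlines_)

-- ===== LEMMAS AND PROOFS =====

-- replace is a no-op when the pattern does not occur
lemma pvGoNoOcc (old new : List Char) :
    ∀ (fuel : Nat) (l acc : List Char), ¬ old <:+: l →
      PySem.Chars.replace.go old new fuel l acc = acc.reverse ++ l := by
  intro fuel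
  induction fuel with
  | zero => intro l acc _; rw [PySem.Chars.replace.go]
  | succ n ih =>
    intro l acc h
    cases l with
    | nil =>
      rw [PySem.Chars.replace.go]
      · simp
      · omega
    | cons c t =>
      have hp : old.isPrefixOf (c :: t) = false := by
        rw [Bool.eq_false_iff]
        intro hb
        exact h (List.isPrefixOf_iff_prefix.mp hb).isInfix
      have ht : ¬ old <:+: t := fun hi => h (hi.trans (List.suffix_cons c t).isInfix)
      rw [PySem.Chars.replace.go]
      simp only [hp, Bool.false_eq_true, if_false]
      rw [ih t (c :: acc) ht]
      simp

lemma pvCharsReplaceNoop (s old new : List Char) (h : PySem.Chars.isIn old s = false) :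
    PySem.Chars.replace s old new = s := by
  have hne : old.isEmpty = false := by
    cases old with
    | nil => rw [PySem.Chars.isIn_nil] at h; exact absurd h (by simp)
    | cons c t => rfl
  have hni : ¬ old <:+: s := (PySem.Chars.isIn_eq_false_iff old s).mp h
  rw [PySem.Chars.replace]
  simp only [hne, Bool.false_eq_true, if_false]
  rw [pvGoNoOcc old new s.length s [] hni]
  simp

lemma pvStrReplaceNoop (s old new : String) (h : PySem.Str.isIn old s = false) :
    PySem.Str.replace s old new = s := by
  have hc : PySem.Chars.isIn old.toList s.toList = false := by
    rw [← PySem.Str.isIn_eq]; exact h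
  apply String.toList_inj.mp
  rw [PySem.Str.toList_replace, pvCharsReplaceNoop _ _ _ hc]

-- proof-only common shape of one transformed body line
def pvBase (t : String) : String :=
  let s := PySem.Str.replace t "\n" ""
  if PySem.Str.isIn "A:" t then PySem.Str.replace s "A:" "\nA:" else s

def pvTrans : List String → Int → List String
  | [], _ => []
  | t :: r, c =>
    if PySem.Str.isIn "Q:" t
    then PySem.Str.replace (pvBase t) "Q:" ("\n\n#Q" ++ PySem.Int.toStr c ++ "\nQ:") :: pvTrans r (c + 1)
    else pvBase t :: pvTrans r c

-- A's loop, characterised: headers collect, body lines become pvTrans with the running count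
lemma pv_foldA (l : List String) :
    ∀ (L h : List String) (c : Int),
      l.foldl pvStepA (L, h, c) =
        (L ++ pvTrans (l.filter (fun t => t != "\n" && !(PySem.Str.isIn "#" t))) c,
         h ++ l.filter (fun t => t != "\n" && PySem.Str.isIn "#" t),
         c + (((l.filter (fun t => t != "\n" && !(PySem.Str.isIn "#" t))).countP
                 (fun u => PySem.Str.isIn "Q:" u) : Nat) : Int)) := by
  induction l with
  | nil => intro L h c; simp [pvTrans]
  | cons t r ih =>
    intro L h c
    by_cases hn : t = "\n"
    · subst hn
      have e1 : pvStepA (L, h, c) "\n" = (L, h, c) := by simp [pvStepA]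
      have e2 : (("\n" : String) != "\n") = false := by decide
      rw [List.foldl_cons, e1, ih]
      simp only [List.filter_cons, e2, Bool.false_and, Bool.false_eq_true, if_false]
    · have e1 : (t != "\n") = true := by simp [hn]
      by_cases hh : PySem.Str.isIn "#" t = true
      · have e2 : pvStepA (L, h, c) t = (L, h ++ [t], c) := by
          simp only [pvStepA]; rw [if_neg hn, if_pos hh]
        rw [List.foldl_cons, e2, ih]
        simp only [List.filter_cons, e1, hh, Bool.and_true, Bool.not_true, Bool.and_false,
          Bool.false_eq_true, if_false, if_true, List.append_assoc, List.cons_append,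
          List.nil_append]
      · have hh' : PySem.Str.isIn "#" t = false := by simpa using hh
        have hbase : pvStepA (L, h, c) t =
            (if PySem.Str.isIn "Q:" t
             then (L ++ [PySem.Str.replace (pvBase t) "Q:" ("\n\n#Q" ++ PySem.Int.toStr c ++ "\nQ:")], h, c + 1)
             else (L ++ [pvBase t], h, c)) := by
          simp only [pvStepA, pvBase]
          rw [if_neg hn, if_neg (by simp only [hh', Bool.false_eq_true, not_false_eq_true])]
          by_cases hnl : PySem.Str.isIn "\n" t = true
          · simp only [hnl, if_true]
          · have hnl' : PySem.Str.isIn "\n" t = false := by simpa using hnl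
            simp only [hnl', Bool.false_eq_true, if_false,
              pvStrReplaceNoop t "\n" "" hnl']
        rw [List.foldl_cons, hbase]
        by_cases hq : PySem.Str.isIn "Q:" t = true
        · rw [if_pos hq, ih]
          simp only [List.filter_cons, e1, hh', Bool.not_false, Bool.and_true,
            Bool.and_false, Bool.false_eq_true, if_false, if_true, pvTrans, hq,
            List.countP_cons, List.append_assoc, List.cons_append, List.nil_append,
            Prod.mk.injEq]
          refine ⟨trivial, trivial, ?_⟩
          push_cast
          ring
        · have hq' : PySem.Str.isIn "Q:" t = false := by simpa using hq
          rw [if_neg (by simp only [hq', Bool.false_eq_true, not_false_eq_true]), ih]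
          simp only [List.filter_cons, e1, hh', Bool.not_false, Bool.and_true,
            Bool.and_false, Bool.false_eq_true, if_false, if_true, pvTrans, hq',
            List.countP_cons, List.append_assoc, List.cons_append, List.nil_append,
            Prod.mk.injEq]
          refine ⟨trivial, trivial, ?_⟩
          simp

-- B's stateless map equals pvTrans: the rank over body[:k] plays the counter's role
lemma pv_mapFmt (body : List String) :
    ∀ (r : List String) (k : Nat), body.drop k = r →
      (PySem.List.enumerate r (k : Int)).map (fun p => pvFmt body p.1 p.2)
        = pvTrans r (((body.take k).countP (fun u => PySem.Str.isIn "Q:" u) : Nat) : Int) := by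
  intro r
  induction r with
  | nil => intro k _; simp [PySem.List.enumerate_nil, pvTrans]
  | cons t r' ih =>
    intro k hdrop
    have hget : body[k]? = some t := by
      have h0 : (body.drop k)[0]? = some t := by rw [hdrop]; rfl
      simpa using h0
    have hdrop' : body.drop (k + 1) = r' := by
      have h1 : List.drop 1 (body.drop k) = r' := by rw [hdrop]; rfl
      rw [List.drop_drop] at h1
      simpa using h1
    have hslice : PySem.List.slice body none (some (k : Int)) = body.take k :=
      PySem.List.slice_to_natCast body k
    have htake : body.take (k + 1) = body.take k ++ [t] := by
      rw [List.take_add_one, hget]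
      rfl
    have htail : (PySem.List.enumerate r' ((k : Int) + 1)).map (fun p => pvFmt body p.1 p.2)
        = pvTrans r' (((body.take (k + 1)).countP (fun u => PySem.Str.isIn "Q:" u) : Nat) : Int) := by
      have h2 := ih (k + 1) hdrop'
      push_cast at h2
      exact h2
    rw [PySem.List.enumerate_cons, List.map_cons, htail, htake, List.countP_append]
    by_cases hq : PySem.Str.isIn "Q:" t = true
    · simp only [pvFmt, pvBase, pvTrans, hslice, hq, if_true, List.countP_cons,
        List.countP_nil, Nat.zero_add]
      constructor
    · have hq' : PySem.Str.isIn "Q:" t = false := by simpa using hq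
      simp only [pvFmt, pvBase, pvTrans, hslice, hq', Bool.false_eq_true, if_false,
        List.countP_cons, List.countP_nil, Nat.zero_add]
      constructor

-- ===== VERDICT (by name: the statement is the Claim_ definition above) =====
theorem user_fx_spec : Claim_equal_user_fx := by
  intro txtlines_ _
  unfold Spec_user_fx user_fx user_fx_alt
  rw [PySem.List.foldl_pyRange_zero_pyGetD txtlines_ "" pvStepA ([], [], 0)]
  rw [pv_foldA]
  have hmap := pv_mapFmt (txtlines_.filter (fun t => t != "\n" && !(PySem.Str.isIn "#" t)))
      (txtlines_.filter (fun t => t != "\n" && !(PySem.Str.isIn "#" t))) 0 rfl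
  simp only [Nat.cast_zero, List.take_zero, List.countP_nil] at hmap
  simp only [List.nil_append]
  rw [hmap]
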